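-- pv_equiv track=rewrite | github.com/ijodmusakh/matrix-calc | prob2.py | subtract_lambda_identity
-- ===== SOURCE A (Python) =====
-- def subtract_lambda_identity(matrix, lambda_val, size):
--     result = []
--     for i in range(size):
--         row = []
--         for j in range(size):
--             if i == j:
--                 row.append(matrix[i][j] - lambda_val)
--             else:
--                 row.append(matrix[i][j])
--         result.append(row)
--     return result
-- ===== SOURCE B (Python) =====
-- def subtract_lambda_identity(matrix, lambda_val, size):
--     # Build the scaled identity matrix lambda*I explicitly, then do a generic
--     # elementwise matrix subtraction with zip (no per-cell i==j branch).
--     lam_identity = []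
--     for i in range(size):
--         li = [0] * size
--         li[i] = lambda_val
--         lam_identity.append(li)
--     return [[a - b for a, b in zip(row[:size], li)]
--             for row, li in zip(matrix, lam_identity)]
-- ===== Notes on version B (the rewrite author's own statement) =====
-- stated objective: alternative
-- what changed: Instead of a nested loop with a per-cell i==j branch, B materialises the scaled identity matrix lambda*I (rows of zeros with lambda placed at the diagonal position) and then performs a generic elementwise matrix subtraction matrix - lambda*I via zip, with no conditional at all.
import Mathlib
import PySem

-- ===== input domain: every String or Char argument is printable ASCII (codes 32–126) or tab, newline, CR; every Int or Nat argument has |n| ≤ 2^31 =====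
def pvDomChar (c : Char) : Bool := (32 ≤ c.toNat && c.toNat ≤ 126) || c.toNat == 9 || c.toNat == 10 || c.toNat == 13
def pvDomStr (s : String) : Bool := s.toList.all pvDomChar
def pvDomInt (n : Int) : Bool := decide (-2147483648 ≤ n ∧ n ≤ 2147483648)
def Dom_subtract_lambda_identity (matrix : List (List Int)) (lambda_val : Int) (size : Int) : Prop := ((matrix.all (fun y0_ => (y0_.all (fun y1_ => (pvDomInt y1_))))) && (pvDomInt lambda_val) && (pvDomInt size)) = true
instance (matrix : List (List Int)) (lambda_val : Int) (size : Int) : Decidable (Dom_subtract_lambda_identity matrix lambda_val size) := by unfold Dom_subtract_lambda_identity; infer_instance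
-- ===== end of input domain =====

-- B builds the scaled identity matrix lambda*I and subtracts it elementwise with zip, instead of A's nested loop with a per-cell i==j branch; same cost, same return value.

-- ===== PORT A =====
-- nested for-loops appending to `result`/`row`; matrix[i][j] via pyGetD (in range under Pre_)
def subtract_lambda_identity (matrix : List (List Int)) (lambda_val : Int) (size : Int) : List (List Int) :=
  (PySem.List.pyRange 0 size 1).foldl (fun result i =>
    result ++ [(PySem.List.pyRange 0 size 1).foldl (fun row j =>
      if i == j then
        row ++ [PySem.List.pyGetD (PySem.List.pyGetD matrix i []) j 0 - lambda_val]
      else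
        row ++ [PySem.List.pyGetD (PySem.List.pyGetD matrix i []) j 0]) []]) []

-- ===== PORT B =====
-- pass 1: build lam_identity = lambda*I ([0]*size with lambda assigned at index i; pySetD — the index is in range for every i in range(size));
-- pass 2: elementwise subtraction [[a - b for a, b in zip(row[:size], li)] for row, li in zip(matrix, lam_identity)]
def subtract_lambda_identity_alt (matrix : List (List Int)) (lambda_val : Int) (size : Int) : List (List Int) :=
  let lam_identity := (PySem.List.pyRange 0 size 1).foldl (fun acc i =>
    acc ++ [PySem.List.pySetD (List.replicate size.toNat 0) i lambda_val]) []
  (matrix.zip lam_identity).map (fun p =>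
    ((PySem.List.slice p.1 none (some size)).zip p.2).map (fun q => q.1 - q.2))

-- ===== PRECONDITION & SPEC =====
-- Pre_: exactly where Python A returns without an IndexError: the first `size` rows exist and each has at least `size` entries.
def Pre_subtract_lambda_identity (matrix : List (List Int)) (lambda_val : Int) (size : Int) : Prop :=
  size ≤ (matrix.length : Int) ∧ ∀ row ∈ matrix.take size.toNat, size ≤ (row.length : Int)
instance (matrix : List (List Int)) (lambda_val : Int) (size : Int) : Decidable (Pre_subtract_lambda_identity matrix lambda_val size) := by unfold Pre_subtract_lambda_identity; infer_instance

def pvWitness_subtract_lambda_identity : List (List Int) × Int × Int := ([[1, 2], [3, 4]], 5, 2)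

def Spec_subtract_lambda_identity (matrix : List (List Int)) (lambda_val : Int) (size : Int) (out : List (List Int)) : Prop := out = subtract_lambda_identity_alt matrix lambda_val size
instance (matrix : List (List Int)) (lambda_val : Int) (size : Int) (out : List (List Int)) : Decidable (Spec_subtract_lambda_identity matrix lambda_val size out) := by unfold Spec_subtract_lambda_identity; infer_instance

-- ===== CLAIM (what is proved, stated in full; the proofs are below) =====
def Claim_equal_subtract_lambda_identity : Prop := ∀ (matrix : List (List Int)) (lambda_val : Int) (size : Int), Dom_subtract_lambda_identity matrix lambda_val size → Pre_subtract_lambda_identity matrix lambda_val size → Spec_subtract_lambda_identity matrix lambda_val size (subtract_lambda_identity matrix lambda_val size)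

-- ===== LEMMAS AND PROOFS =====

-- A's nested append-folds, as a map of maps over range n (g i j = matrix[i][j] via pyGetD)
theorem pv_A_eq (matrix : List (List Int)) (lambda_val : Int) (n : ℕ) :
    subtract_lambda_identity matrix lambda_val (n : Int)
    = (List.range n).map (fun (i : ℕ) => (List.range n).map (fun (j : ℕ) =>
        if j = i then PySem.List.pyGetD (PySem.List.pyGetD matrix (i : Int) []) (i : Int) 0 - lambda_val
        else PySem.List.pyGetD (PySem.List.pyGetD matrix (i : Int) []) (j : Int) 0)) := by
  simp only [subtract_lambda_identity]
  rw [PySem.List.pyRange_one]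
  simp only [Int.sub_zero, Int.zero_add, Int.toNat_natCast, List.foldl_map]
  rw [show (fun result (i : ℕ) =>
      result ++ [(List.range n).foldl (fun row (j : ℕ) =>
        if ((i : Int) == (j : Int)) then
          row ++ [PySem.List.pyGetD (PySem.List.pyGetD matrix (i : Int) []) (j : Int) 0 - lambda_val]
        else
          row ++ [PySem.List.pyGetD (PySem.List.pyGetD matrix (i : Int) []) (j : Int) 0]) []])
    = (fun result (i : ℕ) =>
      result ++ [(List.range n).foldl (fun row (j : ℕ) =>
        row ++ [if j = i then PySem.List.pyGetD (PySem.List.pyGetD matrix (i : Int) []) (i : Int) 0 - lambda_val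
                else PySem.List.pyGetD (PySem.List.pyGetD matrix (i : Int) []) (j : Int) 0]) []]) from ?_]
  · rw [PySem.List.foldl_append_singleton_eq_map]
    simp only [List.nil_append]
    apply List.map_congr_left
    intro i _
    rw [PySem.List.foldl_append_singleton_eq_map]
    simp
  · funext result i
    congr 1
    congr 1
    congr 1
    funext row j
    by_cases h : j = i
    · subst h; simp
    · have hbe : ((i : Int) == (j : Int)) = false := by
        simp only [beq_eq_false_iff_ne, ne_eq, Int.natCast_inj]
        omega
      simp [h, hbe]

-- ===== VERDICT (by name: the statement is the Claim_ definition above) =====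
theorem subtract_lambda_identity_spec : Claim_equal_subtract_lambda_identity := by
  intro matrix lambda_val size _ hpre
  unfold Spec_subtract_lambda_identity
  obtain ⟨hlen, hrows⟩ := hpre
  by_cases hs : 0 ≤ size
  · -- write size as a natural cast
    obtain ⟨n, rfl⟩ : ∃ n : ℕ, size = (n : Int) := ⟨size.toNat, (Int.toNat_of_nonneg hs).symm⟩
    rw [pv_A_eq]
    -- B side
    simp only [subtract_lambda_identity_alt]
    rw [PySem.List.pyRange_one]
    simp only [Int.sub_zero, Int.zero_add, Int.toNat_natCast, List.foldl_map]
    rw [PySem.List.foldl_append_singleton_eq_map]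
    simp only [List.nil_append, PySem.List.pySetD_natCast]
    have hnl : n ≤ matrix.length := by exact_mod_cast hlen
    apply List.ext_getElem
    · simp [hnl]
    · intro k h1 h2
      replace h1 : k < n := by simpa using h1
      have hrowk : (n : Int) ≤ ((matrix[k]).length : Int) := by
        apply hrows
        rw [Int.toNat_natCast]
        exact List.mem_take_iff_getElem.mpr ⟨k, by omega, rfl⟩
      have hrowkn : n ≤ (matrix[k]).length := by exact_mod_cast hrowk
      simp only [List.getElem_map, List.getElem_zip, List.getElem_range]
      rw [PySem.List.slice_to_natCast]
      apply List.ext_getElem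
      · simp [hrowkn]
      · intro j j1 j2
        replace j1 : j < n := by simpa using j1
        simp only [List.getElem_map, List.getElem_zip, List.getElem_range,
          List.getElem_take, List.getElem_set, List.getElem_replicate]
        have hmk : PySem.List.pyGetD matrix (k : Int) [] = matrix[k] := by
          rw [PySem.List.pyGetD_natCast, List.getD_eq_getElem?_getD]
          simp [show k < matrix.length by omega]
        rw [hmk]
        have hgj : ∀ m : ℕ, ∀ hm : m < n, PySem.List.pyGetD (matrix[k]) (m : Int) 0 = (matrix[k])[m]'(by omega) := by
          intro m hm
          rw [PySem.List.pyGetD_natCast, List.getD_eq_getElem?_getD]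
          simp [show m < (matrix[k]).length by omega]
        rw [hgj k h1, hgj j j1]
        by_cases h : j = k
        · subst h; simp
        · simp [h, Ne.symm h]
  · -- size < 0: both sides are []
    
    have h0' : size.toNat = 0 := by omega
    simp [subtract_lambda_identity, subtract_lambda_identity_alt,
      PySem.List.pyRange_one, h0']
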